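-- pv_equiv track=rewrite | github.com/seonghun-dev/Algorithm | CodingTest/skt-world/test3.py | split_plan
-- ===== SOURCE A (Python) =====
-- def split_plan(plans, add_service=False):
--     data, service = [], []
--     for plan in plans:
--         plan_split = plan.split(' ')
--         plan_split = list(map(int, plan_split))
--         data.append(plan_split[0])
--         service.append(plan_split[1:] + service[-1] if service and add_service else plan_split[1:])
--     return data, service
-- ===== SOURCE B (Python) =====
-- def split_plan(plans, add_service=False):
--     parsed = [[int(t) for t in p.split(' ')] for p in plans]
--     data = [ps[0] for ps in parsed]
--     rests = [ps[1:] for ps in parsed]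
--     if add_service:
--         service = [[x for r in reversed(rests[:i + 1]) for x in r]
--                    for i in range(len(rests))]
--     else:
--         service = rests
--     return data, service
-- ===== Notes on version B (the rewrite author's own statement) =====
-- stated objective: alternative
-- what changed: A's single interleaved loop threading a running service[-1] is replaced by a parse pass (data + remainders) followed by a separate closed-form build of service, each entry being the concatenation of the reversed prefix of remainders.
import Mathlib
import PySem

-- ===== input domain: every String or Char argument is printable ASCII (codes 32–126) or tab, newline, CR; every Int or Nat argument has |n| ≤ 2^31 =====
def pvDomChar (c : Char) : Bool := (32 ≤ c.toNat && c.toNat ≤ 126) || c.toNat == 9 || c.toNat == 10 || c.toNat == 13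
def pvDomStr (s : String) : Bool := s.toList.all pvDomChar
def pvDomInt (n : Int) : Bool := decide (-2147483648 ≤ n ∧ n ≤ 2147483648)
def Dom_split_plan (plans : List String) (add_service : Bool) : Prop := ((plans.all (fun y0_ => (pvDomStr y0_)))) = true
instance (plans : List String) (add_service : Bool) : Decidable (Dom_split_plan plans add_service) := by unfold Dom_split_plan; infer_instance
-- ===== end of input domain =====

-- B replaces A's single loop that threads the running service[-1] with a parse pass plus a
-- closed-form per-index build of service (concatenating the reversed prefix of remainders).

-- `list(map(int, plan.split(' ')))`; the `.getD 0` only totalises the ValueError case, which Pre_ excludes.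
def parseInts (s : String) : List Int :=
  (PySem.Chars.splitOn s.toList [' ']).map (fun t => (PySem.Int.ofChars? t).getD 0)

-- ===== PORT A =====
def split_plan (plans : List String) (add_service : Bool) : List Int × List (List Int) :=
  plans.foldl
    (fun st plan =>
      let ps := parseInts plan
      (st.1 ++ [ps.headD 0],      -- plan_split[0]; split(' ') is never empty, headD guard unused under Pre_
       st.2 ++ [if st.2 ≠ [] ∧ add_service = true
                then ps.tail ++ st.2.getLastD []   -- plan_split[1:] + service[-1]
                else ps.tail]))                    -- plan_split[1:]
    ([], [])

-- ===== PORT B =====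
def split_plan_alt (plans : List String) (add_service : Bool) : List Int × List (List Int) :=
  let parsed := plans.map parseInts
  let data := parsed.map (fun ps => ps.headD 0)
  let rests := parsed.map (fun ps => ps.tail)
  let service :=
    if add_service then
      (List.range rests.length).map (fun i => ((rests.take (i + 1)).reverse).flatMap id)
      -- rests[:i+1] has a nonnegative bound, so List.take is exact; reversed → .reverse
    else rests
  (data, service)

-- ===== PRECONDITION & SPEC =====
-- Pre_ excludes exactly the inputs where Python's int() raises ValueError in A (and in B):
-- some space-separated token of some plan is not an int literal.
def Pre_split_plan (plans : List String) (add_service : Bool) : Prop :=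
  ∀ p ∈ plans, ∀ t ∈ PySem.Chars.splitOn p.toList [' '], (PySem.Int.ofChars? t).isSome = true
instance (plans : List String) (add_service : Bool) : Decidable (Pre_split_plan plans add_service) := by
  unfold Pre_split_plan; infer_instance
def pvWitness_split_plan : List String × Bool := (["330 20 300", "1000 100 500", "10 1"], true)

def Spec_split_plan (plans : List String) (add_service : Bool) (out : List Int × List (List Int)) : Prop := out = split_plan_alt plans add_service
instance (plans : List String) (add_service : Bool) (out : List Int × List (List Int)) : Decidable (Spec_split_plan plans add_service out) := by unfold Spec_split_plan; infer_instance

-- ===== CLAIM (what is proved, stated in full; the proofs are below) =====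
def Claim_equal_split_plan : Prop := ∀ (plans : List String) (add_service : Bool), Dom_split_plan plans add_service → Pre_split_plan plans add_service → Spec_split_plan plans add_service (split_plan plans add_service)

-- ===== LEMMAS AND PROOFS =====

-- the last service entry B builds for a nonempty prefix is the whole reversed-prefix concatenation
lemma serviceB_getLast (rs : List (List Int)) (m : Nat) (h : rs.length = m + 1) :
    ((List.range rs.length).map (fun i => ((rs.take (i + 1)).reverse).flatMap id)).getLastD []
      = rs.reverse.flatMap id := by
  rw [h, List.range_succ, List.map_append]
  simp only [List.map_cons, List.map_nil, List.getLastD_concat]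
  rw [List.take_of_length_le h.le]

-- extending rests by one remainder appends one closed-form entry
lemma serviceB_append (rs : List (List Int)) (r : List Int) :
    (List.range (rs ++ [r]).length).map (fun i => (((rs ++ [r]).take (i + 1)).reverse).flatMap id)
      = (List.range rs.length).map (fun i => ((rs.take (i + 1)).reverse).flatMap id)
        ++ [r ++ rs.reverse.flatMap id] := by
  rw [List.length_append, List.length_singleton, List.range_succ, List.map_append]
  congr 1
  · refine List.map_congr_left (fun i hi => ?_)
    rw [List.mem_range] at hi
    rw [List.take_append_of_le_length (by omega)]
  · simp [List.take_of_length_le]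

-- B on plans ++ [x] is B on plans extended by exactly A's loop-body update
lemma alt_append (xs : List String) (x : String) (add : Bool) :
    split_plan_alt (xs ++ [x]) add =
      ((split_plan_alt xs add).1 ++ [(parseInts x).headD 0],
       (split_plan_alt xs add).2 ++
         [if (split_plan_alt xs add).2 ≠ [] ∧ add = true
          then (parseInts x).tail ++ (split_plan_alt xs add).2.getLastD []
          else (parseInts x).tail]) := by
  cases add with
  | false => simp [split_plan_alt]
  | true =>
      by_cases hxs : xs = []
      · subst hxs; simp [split_plan_alt]
      · have hp : 0 < xs.length := List.length_pos_of_ne_nil hxs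
        have hm : (((xs.map parseInts).map (fun ps => ps.tail)).length) = (xs.length - 1) + 1 := by
          simp only [List.length_map]; omega
        have h1 := serviceB_getLast ((xs.map parseInts).map (fun ps => ps.tail)) (xs.length - 1) hm
        have h2 := serviceB_append ((xs.map parseInts).map (fun ps => ps.tail)) (parseInts x).tail
        simp only [split_plan_alt, List.map_append, List.map_cons, List.map_nil]
        simp at h1 h2
        simp [hxs, h1, h2]

lemma split_plan_eq_alt (plans : List String) (add_service : Bool) :
    split_plan plans add_service = split_plan_alt plans add_service := by
  induction plans using List.reverseRecOn with
  | nil => simp [split_plan, split_plan_alt]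
  | append_singleton xs x ih =>
      rw [split_plan, List.foldl_append, ← split_plan, ih, alt_append]
      simp only [List.foldl_cons, List.foldl_nil]

-- ===== VERDICT (by name: the statement is the Claim_ definition above) =====
theorem split_plan_spec : Claim_equal_split_plan := by
  intro plans add_service _ _
  unfold Spec_split_plan
  exact split_plan_eq_alt plans add_service
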